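-- pv_equiv track=rewrite | github.com/Rajput-Darshan-Singh/AI_based_student-data-extractor | app.py | merge_students
-- ===== SOURCE A (Python) =====
-- def merge_students(data):
--     merged = {}
--     for entry in data:
--         reg = entry.get("Registration", "").strip()
--         if not reg:
--             continue
--         if reg not in merged:
--             merged[reg] = entry.copy()
--         else:
--             for key in ["Name", "TotalMarks", "SGPA", "Grade"]:
--                 if not merged[reg].get(key) and entry.get(key):
--                     merged[reg][key] = entry[key]
--     all_names = {e["Registration"]: e["Name"] for e in data if e.get("Name")}
--     for reg, entry in merged.items():
--         if not entry.get("Name") and reg in all_names: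
--             entry["Name"] = all_names[reg]
--     return list(merged.values())
-- ===== SOURCE B (Python) =====
-- def merge_students(data):
--     groups = {}
--     for entry in data:
--         reg = entry.get("Registration", "").strip()
--         if reg:
--             groups.setdefault(reg, []).append(entry)
--     merged = {}
--     for reg, entries in groups.items():
--         base = entries[0].copy()
--         for e in entries[1:]:
--             for key in ["Name", "TotalMarks", "SGPA", "Grade"]:
--                 if not base.get(key) and e.get(key):
--                     base[key] = e[key]
--         merged[reg] = base
--     all_names = {e["Registration"]: e["Name"] for e in data if e.get("Name")}
--     for reg, entry in merged.items():
--         if not entry.get("Name") and reg in all_names: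
--             entry["Name"] = all_names[reg]
--     return list(merged.values())
-- ===== Notes on version B (the rewrite author's own statement) =====
-- stated objective: alternative
-- what changed: B replaces A's interleaved dict-merge loop (insert-or-fill per encountered entry) by a two-phase group-then-reduce: it first groups entries per stripped registration with setdefault/append, then folds each group's tail into a copy of its head; the name-patch pass is kept verbatim.
-- outside the precondition, e.g. on merge_students([{'Name': 'Al'}]): A raises KeyError, B raises KeyError
import Mathlib
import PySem

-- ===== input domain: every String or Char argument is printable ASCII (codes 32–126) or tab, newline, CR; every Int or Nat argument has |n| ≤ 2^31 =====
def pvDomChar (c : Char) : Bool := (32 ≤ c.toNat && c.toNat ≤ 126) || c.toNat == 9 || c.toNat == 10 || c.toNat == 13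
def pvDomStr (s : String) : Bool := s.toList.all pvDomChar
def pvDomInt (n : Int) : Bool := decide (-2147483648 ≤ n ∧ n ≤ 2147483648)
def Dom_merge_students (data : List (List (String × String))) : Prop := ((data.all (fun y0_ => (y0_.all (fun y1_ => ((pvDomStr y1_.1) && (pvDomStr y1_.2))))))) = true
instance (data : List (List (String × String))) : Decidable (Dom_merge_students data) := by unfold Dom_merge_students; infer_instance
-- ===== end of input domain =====

-- B replaces A's interleaved insert-or-fill merge loop by a two-phase group-then-reduce
-- (group entries per stripped registration, then fold each group's tail into its head);
-- same cost, different decomposition; the name-patch pass is kept verbatim.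
-- A mutates the dicts it stores only internally (on fresh copies); neither program
-- observably mutates its argument. Equivalence is about the return value.

-- ===== PORT A =====
-- shared with port B: the inner fill loop (`for key in [...]: if not cur.get(key) and e.get(key): cur[key] = e[key]`),
-- which appears verbatim in both Python sources ('' ↔ falsy: all values are strings)
def pvFill (cur e : PySem.Dict String String) : PySem.Dict String String :=
  ["Name", "TotalMarks", "SGPA", "Grade"].foldl
    (fun cur key =>
      if cur.getD key "" = "" ∧ e.getD key "" ≠ "" then cur.insert key (e.getD key "") else cur)
    cur

-- `all_names = {e["Registration"]: e["Name"] for e in data if e.get("Name")}` — verbatim in both sources;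
-- e["Registration"] raises KeyError when absent: those inputs are outside Pre_, the `getD ""` there is arbitrary
def pvAllNames (entries : List (PySem.Dict String String)) : PySem.Dict String String :=
  entries.foldl
    (fun d e =>
      if e.getD "Name" "" ≠ "" then d.insert ((e.get? "Registration").getD "") (e.getD "Name" "") else d)
    PySem.Dict.empty

-- final falsy-Name patch loop + `list(merged.values())` — verbatim in both sources
def pvPatch (allNames : PySem.Dict String String)
    (merged : PySem.Dict String (PySem.Dict String String)) : List (List (String × String)) :=
  merged.items.map (fun p =>
    (if p.2.getD "Name" "" = "" ∧ allNames.contains p.1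
     then p.2.insert "Name" (allNames.getD p.1 "")
     else p.2).items)

-- A's main loop body: first occurrence copies the entry, later ones fill falsy fields
def pvStepA (m : PySem.Dict String (PySem.Dict String String)) (e : PySem.Dict String String) :
    PySem.Dict String (PySem.Dict String String) :=
  let reg := PySem.Str.strip (e.getD "Registration" "")
  if reg = "" then m
  else
    match m.get? reg with
    | none => m.insert reg e
    | some cur => m.insert reg (pvFill cur e)

def merge_students (data : List (List (String × String))) : List (List (String × String)) :=
  let entries := data.map PySem.Dict.ofList
  let merged := entries.foldl pvStepA PySem.Dict.empty
  pvPatch (pvAllNames entries) merged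

-- ===== PORT B =====
-- B's grouping loop body: `groups.setdefault(reg, []).append(entry)` = modify reg [] (· ++ [entry])
def pvStepG (g : PySem.Dict String (List (PySem.Dict String String))) (e : PySem.Dict String String) :
    PySem.Dict String (List (PySem.Dict String String)) :=
  let reg := PySem.Str.strip (e.getD "Registration" "")
  if reg = "" then g else g.modify reg [] (· ++ [e])

-- B's per-group reduction: base = entries[0].copy(); fill from the rest in order
-- ([] branch unreachable: groups only ever stores nonempty lists)
def pvReduce (es : List (PySem.Dict String String)) : PySem.Dict String String :=
  match es with
  | [] => PySem.Dict.empty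
  | h :: t => t.foldl pvFill h

def merge_students_alt (data : List (List (String × String))) : List (List (String × String)) :=
  let entries := data.map PySem.Dict.ofList
  let groups := entries.foldl pvStepG PySem.Dict.empty
  let merged := groups.items.foldl (fun m p => m.insert p.1 (pvReduce p.2)) PySem.Dict.empty
  pvPatch (pvAllNames entries) merged

-- ===== PRECONDITION & SPEC =====
-- Pre_ excludes exactly the inputs on which A raises KeyError: an entry whose "Name" is truthy
-- but which has no "Registration" key (the all_names comprehension indexes e["Registration"]).
def Pre_merge_students (data : List (List (String × String))) : Prop :=
  ∀ e ∈ data, (PySem.Dict.ofList e).getD "Name" "" ≠ "" →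
    (PySem.Dict.ofList e).contains "Registration" = true
instance (data : List (List (String × String))) : Decidable (Pre_merge_students data) := by
  unfold Pre_merge_students; infer_instance

def pvWitness_merge_students : (List (List (String × String))) :=
  [[("Registration", "r1"), ("Name", "Al")], [("Registration", "r1 "), ("Grade", "A")]]

def Spec_merge_students (data : List (List (String × String))) (out : List (List (String × String))) : Prop := out = merge_students_alt data
instance (data : List (List (String × String))) (out : List (List (String × String))) : Decidable (Spec_merge_students data out) := by unfold Spec_merge_students; infer_instance

-- ===== CLAIM (what is proved, stated in full; the proofs are below) =====
def Claim_equal_merge_students : Prop := ∀ (data : List (List (String × String))), Dom_merge_students data → Pre_merge_students data → Spec_merge_students data (merge_students data)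

-- ===== LEMMAS AND PROOFS =====

-- value-map of a group dict: apply pvReduce to every stored group
def pvMapRed (g : PySem.Dict String (List (PySem.Dict String String))) :
    PySem.Dict String (PySem.Dict String String) :=
  PySem.Dict.mk (g.items.map (fun p => (p.1, pvReduce p.2)))

theorem pv_get?_mapVal {κ α β : Type} [BEq κ] (f : α → β) (l : List (κ × α)) (k : κ) :
    (PySem.Dict.mk (l.map (fun p => (p.1, f p.2)))).get? k
      = ((PySem.Dict.mk l).get? k).map f := by
  induction l with
  | nil => rfl
  | cons h t ih =>
    obtain ⟨a, b⟩ := h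
    simp only [List.map_cons, PySem.Dict.get?_mk_cons]
    cases hk : (a == k)
    · simpa [hk] using ih
    · simp

theorem pv_contains_mapVal {κ α β : Type} [BEq κ] (f : α → β) (l : List (κ × α)) (k : κ) :
    (PySem.Dict.mk (l.map (fun p => (p.1, f p.2)))).contains k = (PySem.Dict.mk l).contains k := by
  rw [PySem.Dict.contains_eq_isSome_get?, PySem.Dict.contains_eq_isSome_get?, pv_get?_mapVal]
  cases (PySem.Dict.mk l).get? k <;> rfl

theorem pv_insert_mapVal {κ α β : Type} [BEq κ] (f : α → β) (d : PySem.Dict κ α) (k : κ) (v : α) :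
    (PySem.Dict.mk (d.items.map (fun p => (p.1, f p.2)))).insert k (f v)
      = PySem.Dict.mk ((d.insert k v).items.map (fun p => (p.1, f p.2))) := by
  have hc : (PySem.Dict.mk (d.items.map (fun p => (p.1, f p.2)))).contains k = d.contains k := by
    cases d with | mk l => exact pv_contains_mapVal f l k
  simp only [PySem.Dict.insert, hc]
  by_cases h : d.contains k = true
  · simp only [h, if_pos]
    congr 1
    simp only [List.map_map]
    refine List.map_congr_left (fun p _ => ?_)
    by_cases hp : (p.1 == k) = true <;> simp [hp]
  · simp [h]

theorem pv_reduce_append (es : List (PySem.Dict String String)) (e : PySem.Dict String String)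
    (h : es ≠ []) : pvReduce (es ++ [e]) = pvFill (pvReduce es) e := by
  cases es with
  | nil => exact absurd rfl h
  | cons a t => simp [pvReduce, List.foldl_append]

theorem pv_step_comm (g : PySem.Dict String (List (PySem.Dict String String)))
    (hg : ∀ p ∈ g.items, p.2 ≠ []) (e : PySem.Dict String String) :
    pvStepA (pvMapRed g) e = pvMapRed (pvStepG g e) := by
  unfold pvStepA pvStepG
  by_cases hreg : PySem.Str.strip (e.getD "Registration" "") = ""
  · simp [hreg]
  · simp only [hreg, if_false]
    set reg := PySem.Str.strip (e.getD "Registration" "") with hr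
    have hget : (pvMapRed g).get? reg = (g.get? reg).map pvReduce := by
      cases g with | mk l => exact pv_get?_mapVal pvReduce l reg
    rw [PySem.Dict.modify]
    cases hcase : g.get? reg with
    | none =>
      rw [hget, hcase]
      have hgd : g.getD reg [] = [] := PySem.Dict.getD_of_get?_eq_none _ _ hcase
      rw [hgd]
      simp only [List.nil_append, Option.map_none]
      have : e = pvReduce [e] := rfl
      rw [this, pvMapRed]
      cases g with | mk l => exact pv_insert_mapVal pvReduce (PySem.Dict.mk l) reg [e]
    | some es =>
      rw [hget, hcase]
      have hne : es ≠ [] := hg (reg, es) (PySem.Dict.mem_items_of_get?_eq_some _ hcase)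
      have hgd' : g.getD reg [] = es := by
        rw [PySem.Dict.getD_eq_get?_getD, hcase]; rfl
      rw [hgd']
      simp only [Option.map_some]
      rw [← pv_reduce_append es e hne, pvMapRed]
      cases g with | mk l => exact pv_insert_mapVal pvReduce (PySem.Dict.mk l) reg (es ++ [e])

theorem pv_step_inv (g : PySem.Dict String (List (PySem.Dict String String)))
    (hg : ∀ p ∈ g.items, p.2 ≠ []) (e : PySem.Dict String String) :
    ∀ p ∈ (pvStepG g e).items, p.2 ≠ [] := by
  unfold pvStepG
  by_cases hreg : PySem.Str.strip (e.getD "Registration" "") = ""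
  · simpa [hreg] using hg
  · simp only [hreg, if_false]
    intro p hp
    rw [PySem.Dict.modify, PySem.Dict.mem_items_insert] at hp
    rcases hp with h | h
    · subst h; simp
    · exact hg p h.1

theorem pv_fold_comm (entries : List (PySem.Dict String String))
    (g : PySem.Dict String (List (PySem.Dict String String)))
    (hg : ∀ p ∈ g.items, p.2 ≠ []) :
    entries.foldl pvStepA (pvMapRed g) = pvMapRed (entries.foldl pvStepG g) := by
  induction entries generalizing g with
  | nil => rfl
  | cons e t ih =>
    simp only [List.foldl_cons]
    rw [pv_step_comm g hg e]
    exact ih (pvStepG g e) (pv_step_inv g hg e)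

theorem pv_merged_eq (entries : List (PySem.Dict String String)) :
    entries.foldl pvStepA PySem.Dict.empty
      = PySem.Dict.mk (((entries.foldl pvStepG PySem.Dict.empty).items).map
          (fun p => (p.1, pvReduce p.2))) := by
  have h0 : ∀ p ∈ (PySem.Dict.empty : PySem.Dict String (List (PySem.Dict String String))).items,
      p.2 ≠ [] := by intro p hp; simp [PySem.Dict.empty] at hp
  have := pv_fold_comm entries PySem.Dict.empty h0
  simpa [pvMapRed] using this

-- B's merged dict: inserting the reduced groups in order over distinct fresh keys is Dict.mk of the map
theorem pv_foldl_insert_items (g : PySem.Dict String (List (PySem.Dict String String)))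
    (hnd : g.keys.Nodup) :
    g.items.foldl (fun m p => m.insert p.1 (pvReduce p.2)) PySem.Dict.empty
      = PySem.Dict.mk (g.items.map (fun p => (p.1, pvReduce p.2))) := by
  have := PySem.Dict.items_foldl_insert_fresh (l := g.items) (k := fun p => p.1)
      (v := fun p => pvReduce p.2) (d := (PySem.Dict.empty : PySem.Dict String (PySem.Dict String String)))
      (by intro a _; simp [PySem.Dict.empty, PySem.Dict.contains]) (by simpa [PySem.Dict.keys] using hnd)
  apply PySem.Dict.ext
  simpa [PySem.Dict.empty] using this

theorem pv_stepG_nodup (g : PySem.Dict String (List (PySem.Dict String String)))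
    (hg : g.keys.Nodup) (e : PySem.Dict String String) : (pvStepG g e).keys.Nodup := by
  unfold pvStepG
  by_cases hreg : PySem.Str.strip (e.getD "Registration" "") = ""
  · simpa [hreg] using hg
  · simp only [hreg, if_false]
    rw [PySem.Dict.modify]
    exact PySem.Dict.nodup_keys_insert _ _ _ hg

theorem pv_groups_nodup (entries : List (PySem.Dict String String)) :
    (entries.foldl pvStepG PySem.Dict.empty).keys.Nodup := by
  have h : ∀ (g : PySem.Dict String (List (PySem.Dict String String))), g.keys.Nodup →
      (entries.foldl pvStepG g).keys.Nodup := by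
    induction entries with
    | nil => exact fun g hg => hg
    | cons e t ih => exact fun g hg => ih _ (pv_stepG_nodup g hg e)
  exact h _ PySem.Dict.nodup_keys_empty

-- ===== VERDICT (by name: the statement is the Claim_ definition above) =====
theorem merge_students_spec : Claim_equal_merge_students := by
  intro data _ _
  unfold Spec_merge_students merge_students merge_students_alt
  dsimp only
  rw [pv_merged_eq, pv_foldl_insert_items _ (pv_groups_nodup _)]
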